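-- pv_equiv track=rewrite | github.com/pratiksontakke/W4D5 | Q4/core/chunking/strategies.py | _split_code_sections
-- ===== SOURCE A (Python) =====
-- from typing import Dict, List, Optional
--
-- def _split_code_sections(text: str) -> List[str]:
--     """Split text into code and non-code sections."""
--     sections = []
--     current_section = []
--     in_code_block = False
--
--     for line in text.split('\n'):
--         if line.strip().startswith('```'):
--             if in_code_block:
--                 current_section.append(line)
--                 sections.append('\n'.join(current_section))
--                 current_section = []
--             else:
--                 if current_section:
--                     sections.append('\n'.join(current_section))
--                     current_section = []
--                 current_section.append(line)
--             in_code_block = not in_code_block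
--         else:
--             current_section.append(line)
--
--     if current_section:
--         sections.append('\n'.join(current_section))
--
--     return sections
-- ===== SOURCE B (Python) =====
-- def _split_code_sections(text):
--     """Split text into code and non-code sections (scan-and-slice version)."""
--     def is_fence(line):
--         return line.strip().startswith('```')
--
--     lines = text.split('\n')
--     n = len(lines)
--     sections = []
--     i = 0
--     while i < n:
--         # advance over the non-code run
--         j = i
--         while j < n and not is_fence(lines[j]):
--             j += 1
--         if j > i:
--             sections.append('\n'.join(lines[i:j]))
--         if j == n:
--             break
--         # lines[j] opens a code block; find its closing fence
--         k = j + 1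
--         while k < n and not is_fence(lines[k]):
--             k += 1
--         end = k + 1 if k < n else n
--         sections.append('\n'.join(lines[j:end]))
--         i = end
--     return sections
-- ===== Notes on version B (the rewrite author's own statement) =====
-- stated objective: alternative
-- what changed: Replaces A's single line-by-line fold carrying (sections, current_section, in_code_block) state with an index-scanning loop: it locates the ends of whole non-code runs and whole fenced blocks and emits each section as one slice-and-join, with no per-line accumulator or toggle flag.
import Mathlib
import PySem

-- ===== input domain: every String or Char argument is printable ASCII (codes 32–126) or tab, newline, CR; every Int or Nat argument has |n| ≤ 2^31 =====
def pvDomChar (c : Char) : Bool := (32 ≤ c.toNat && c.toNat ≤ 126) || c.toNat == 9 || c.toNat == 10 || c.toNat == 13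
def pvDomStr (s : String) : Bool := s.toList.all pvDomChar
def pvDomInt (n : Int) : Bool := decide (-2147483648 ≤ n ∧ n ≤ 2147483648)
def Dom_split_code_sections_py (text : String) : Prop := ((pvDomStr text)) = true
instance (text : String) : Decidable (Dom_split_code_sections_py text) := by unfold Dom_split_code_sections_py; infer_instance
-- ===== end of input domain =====

-- B replaces A's stateful per-line fold by an index/run-scanning decomposition (same cost, different structure).

-- line.strip().startswith('```')
def pvIsFence (line : String) : Bool := PySem.Str.startswith (PySem.Str.strip line) "```"

-- ===== PORT A =====
-- A's for-loop over the lines, state = (sections, current_section, in_code_block)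
def pvLoopA : List String → List String → List String → Bool → List String
  | [], sections, current, _ =>
      if current = [] then sections else sections ++ [PySem.Str.join "\n" current]
  | l :: ls, sections, current, in_code =>
      if pvIsFence l then
        if in_code then
          pvLoopA ls (sections ++ [PySem.Str.join "\n" (current ++ [l])]) [] false
        else
          pvLoopA ls (if current = [] then sections else sections ++ [PySem.Str.join "\n" current]) [l] true
      else
        pvLoopA ls sections (current ++ [l]) in_code

def split_code_sections_py (text : String) : List String :=
  pvLoopA ((PySem.Str.split? text "\n").getD []) [] [] false

-- ===== PORT B =====
-- Source B's outer while-loop: one pvGoB call = one iteration; the inner index scans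
-- (j and k advancing past non-fence lines) are takeWhile/dropWhile, the slices are the results.
mutual
def pvGoB (lines : List String) : List String :=
  let pre := lines.takeWhile (fun l => !pvIsFence l)
  let rest := lines.dropWhile (fun l => !pvIsFence l)
  (if pre = [] then [] else [PySem.Str.join "\n" pre]) ++ pvGoCode rest
termination_by (lines.length, 1)
decreasing_by
  simp only [Prod.lex_def]
  have h := (List.dropWhile_sublist (l := lines) (p := fun l => !pvIsFence l)).length_le
  omega

def pvGoCode (lines : List String) : List String :=
  match lines with
  | [] => []
  | f :: r =>
    let body := r.takeWhile (fun l => !pvIsFence l)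
    match h : r.dropWhile (fun l => !pvIsFence l) with
    | [] => [PySem.Str.join "\n" (f :: body)]
    | g :: r3 => PySem.Str.join "\n" (f :: (body ++ [g])) :: pvGoB r3
termination_by (lines.length, 0)
decreasing_by
  simp only [Prod.lex_def]
  have hle := (List.dropWhile_sublist (l := r) (p := fun l => !pvIsFence l)).length_le
  rw [h] at hle
  simp only [List.length_cons] at *
  omega
end

def split_code_sections_py_alt (text : String) : List String :=
  pvGoB ((PySem.Str.split? text "\n").getD [])

-- ===== PRECONDITION & SPEC =====
def Spec_split_code_sections_py (text : String) (out : List String) : Prop := out = split_code_sections_py_alt text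
instance (text : String) (out : List String) : Decidable (Spec_split_code_sections_py text out) := by unfold Spec_split_code_sections_py; infer_instance

-- ===== CLAIM (what is proved, stated in full; the proofs are below) =====
def Claim_equal_split_code_sections_py : Prop := ∀ (text : String), Dom_split_code_sections_py text → Spec_split_code_sections_py text (split_code_sections_py text)

-- ===== LEMMAS AND PROOFS =====

-- generalisations of B's two phases with a pending prefix `cur` (A's current_section)
def pvGoCgen (cur : List String) (lines : List String) : List String :=
  match lines.dropWhile (fun l => !pvIsFence l) with
  | [] => [PySem.Str.join "\n" (cur ++ lines.takeWhile (fun l => !pvIsFence l))]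
  | g :: r3 => PySem.Str.join "\n" (cur ++ lines.takeWhile (fun l => !pvIsFence l) ++ [g]) :: pvGoB r3

def pvGoNgen (cur : List String) (lines : List String) : List String :=
  (if cur ++ lines.takeWhile (fun l => !pvIsFence l) = [] then []
   else [PySem.Str.join "\n" (cur ++ lines.takeWhile (fun l => !pvIsFence l))]) ++
  match lines.dropWhile (fun l => !pvIsFence l) with
  | [] => []
  | f :: r => pvGoCgen [f] r

lemma pvGoCode_eq (rest : List String) :
    pvGoCode rest = match rest with | [] => [] | f :: r => pvGoCgen [f] r := by
  cases rest with
  | nil => simp [pvGoCode]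
  | cons f r =>
    simp only [pvGoCode, pvGoCgen]
    cases h : r.dropWhile (fun l => !pvIsFence l) <;> simp [h]

lemma pvGoNgen_nil (lines : List String) : pvGoNgen [] lines = pvGoB lines := by
  simp only [pvGoNgen, pvGoB, List.nil_append, pvGoCode_eq]

lemma pvLoopA_gen (lines : List String) :
    (∀ sections cur, pvLoopA lines sections cur false = sections ++ pvGoNgen cur lines) ∧
    (∀ sections cur, cur ≠ [] → pvLoopA lines sections cur true = sections ++ pvGoCgen cur lines) := by
  induction lines with
  | nil =>
    constructor
    · intro sections cur
      by_cases hc : cur = [] <;> simp [pvLoopA, pvGoNgen, hc]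
    · intro sections cur hc
      simp [pvLoopA, pvGoCgen, hc]
  | cons l ls ih =>
    obtain ⟨ihN, ihC⟩ := ih
    constructor
    · intro sections cur
      by_cases hf : pvIsFence l
      · simp only [pvLoopA, hf, if_true]
        rw [ihC _ [l] (by simp)]
        simp only [pvGoNgen, List.takeWhile_cons, List.dropWhile_cons, hf,
          Bool.not_true, List.append_nil]
        by_cases hc : cur = [] <;> simp [hc]
      · rw [Bool.not_eq_true] at hf
        simp only [pvLoopA, hf, Bool.false_eq_true, if_false]
        rw [ihN]
        simp [pvGoNgen, List.takeWhile_cons, List.dropWhile_cons, hf]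
    · intro sections cur hc
      by_cases hf : pvIsFence l
      · simp only [pvLoopA, hf, if_true]
        rw [ihN]
        simp [pvGoCgen, List.takeWhile_cons, List.dropWhile_cons, hf, pvGoNgen_nil]
      · rw [Bool.not_eq_true] at hf
        simp only [pvLoopA, hf, Bool.false_eq_true, if_false]
        rw [ihC _ _ (by simp)]
        simp [pvGoCgen, List.takeWhile_cons, List.dropWhile_cons, hf]

-- ===== VERDICT (by name: the statement is the Claim_ definition above) =====
theorem split_code_sections_py_spec : Claim_equal_split_code_sections_py := by
  intro text _
  unfold Spec_split_code_sections_py split_code_sections_py split_code_sections_py_alt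
  rw [(pvLoopA_gen _).1, pvGoNgen_nil]
  simp
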